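-- pv_equiv track=rewrite | github.com/DavidVelazquezBernal/Capstone-proyect | src/agents/testing.py | _strip_ts_strings_and_comments
-- ===== SOURCE A (Python) =====
-- def _strip_ts_strings_and_comments(code: str) -> str:
--     i = 0
--     n = len(code)
--     out_chars: list[str] = []
--
--     NORMAL = 0
--     SQ = 1
--     DQ = 2
--     BT = 3
--     LINE_COMMENT = 4
--     BLOCK_COMMENT = 5
--
--     state = NORMAL
--     while i < n:
--         ch = code[i]
--         nxt = code[i + 1] if i + 1 < n else ""
--
--         if state == NORMAL:
--             if ch == "'":
--                 state = SQ
--                 out_chars.append(' ')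
--                 i += 1
--                 continue
--             if ch == '"':
--                 state = DQ
--                 out_chars.append(' ')
--                 i += 1
--                 continue
--             if ch == '`':
--                 state = BT
--                 out_chars.append(' ')
--                 i += 1
--                 continue
--             if ch == '/' and nxt == '/':
--                 state = LINE_COMMENT
--                 out_chars.append(' ')
--                 out_chars.append(' ')
--                 i += 2
--                 continue
--             if ch == '/' and nxt == '*':
--                 state = BLOCK_COMMENT
--                 out_chars.append(' ')
--                 out_chars.append(' ')
--                 i += 2
--                 continue
--
--             out_chars.append(ch)
--             i += 1
--             continue
--
--         if state in (SQ, DQ, BT):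
--             quote = "'" if state == SQ else ('"' if state == DQ else '`')
--             if ch == '\\':
--                 out_chars.append(' ')
--                 if i + 1 < n:
--                     out_chars.append(' ')
--                     i += 2
--                 else:
--                     i += 1
--                 continue
--             if ch == quote:
--                 out_chars.append(' ')
--                 state = NORMAL
--                 i += 1
--                 continue
--
--             out_chars.append('\n' if ch == '\n' else ' ')
--             i += 1
--             continue
--
--         if state == LINE_COMMENT:
--             if ch == '\n':
--                 out_chars.append('\n')
--                 state = NORMAL
--                 i += 1
--             else:
--                 out_chars.append(' ')
--                 i += 1
--             continue
--
--         if state == BLOCK_COMMENT: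
--             if ch == '*' and nxt == '/':
--                 out_chars.append(' ')
--                 out_chars.append(' ')
--                 state = NORMAL
--                 i += 2
--             else:
--                 out_chars.append('\n' if ch == '\n' else ' ')
--                 i += 1
--             continue
--
--     return ''.join(out_chars)
-- ===== SOURCE B (Python) =====
-- # B: structured recursive-descent decomposition — one helper per token kind
-- # (string body, line comment, block comment), each consuming its span and
-- # returning (blanked chunk, next index); no explicit state variable.
--
-- def _blank(ch):
--     return '\n' if ch == '\n' else ' '
--
-- def _skip_string(code, i, quote):
--     n = len(code)
--     out = []
--     while i < n:
--         c = code[i]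
--         if c == '\\':
--             if i + 1 < n:
--                 out.append('  ')
--                 i += 2
--             else:
--                 out.append(' ')
--                 i += 1
--         elif c == quote:
--             out.append(' ')
--             return ''.join(out), i + 1
--         else:
--             out.append(_blank(c))
--             i += 1
--     return ''.join(out), i
--
-- def _skip_line_comment(code, i):
--     n = len(code)
--     out = []
--     while i < n and code[i] != '\n':
--         out.append(' ')
--         i += 1
--     return ''.join(out), i  # the newline (if any) is copied by the caller
--
-- def _skip_block_comment(code, i):
--     n = len(code)
--     out = []
--     while i < n:
--         if code[i] == '*' and i + 1 < n and code[i + 1] == '/':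
--             out.append('  ')
--             return ''.join(out), i + 2
--         out.append(_blank(code[i]))
--         i += 1
--     return ''.join(out), i
--
-- def _strip_ts_strings_and_comments(code: str) -> str:
--     out = []
--     i, n = 0, len(code)
--     while i < n:
--         ch = code[i]
--         if ch in "'\"`":
--             body, i = _skip_string(code, i + 1, ch)
--             out.append(' ' + body)
--         elif code.startswith('//', i):
--             body, i = _skip_line_comment(code, i + 2)
--             out.append('  ' + body)
--         elif code.startswith('/*', i):
--             body, i = _skip_block_comment(code, i + 2)
--             out.append('  ' + body)
--         else:
--             out.append(ch)
--             i += 1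
--     return ''.join(out)
-- ===== Notes on version B (the rewrite author's own statement) =====
-- stated objective: alternative
-- what changed: Replaced A's single while-loop state machine with a numeric state variable by a structured recursive-descent decomposition: one helper per token kind (string body, line comment, block comment), each consuming and blanking its whole span and returning the remainder.
import Mathlib
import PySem

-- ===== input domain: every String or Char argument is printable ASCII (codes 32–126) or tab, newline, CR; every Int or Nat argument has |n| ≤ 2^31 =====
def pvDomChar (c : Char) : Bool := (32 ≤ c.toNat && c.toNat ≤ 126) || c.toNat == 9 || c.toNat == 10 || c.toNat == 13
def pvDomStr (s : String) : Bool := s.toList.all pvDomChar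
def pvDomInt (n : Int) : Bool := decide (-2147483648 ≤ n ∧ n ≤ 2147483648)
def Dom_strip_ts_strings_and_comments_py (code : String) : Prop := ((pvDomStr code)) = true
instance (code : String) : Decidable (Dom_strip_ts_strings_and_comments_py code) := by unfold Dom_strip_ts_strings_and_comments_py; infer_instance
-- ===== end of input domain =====

-- B replaces A's single while-loop state machine (numeric state variable) by a
-- structured recursive-descent decomposition: one helper per token kind, each
-- consuming its span; objective: simpler/alternative, same cost, return value proved equal.

-- ===== PORT A =====
-- A: one loop over the characters with a numeric state (0=NORMAL,1=SQ,2=DQ,3=BT,4=LINE,5=BLOCK).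
def aGo (state : Nat) : List Char → List Char
  | [] => []
  | c :: rest =>
    if state = 0 then
      if c = '\'' then ' ' :: aGo 1 rest
      else if c = '"' then ' ' :: aGo 2 rest
      else if c = '`' then ' ' :: aGo 3 rest
      else if c = '/' ∧ rest.head? = some '/' then ' ' :: ' ' :: aGo 4 rest.tail
      else if c = '/' ∧ rest.head? = some '*' then ' ' :: ' ' :: aGo 5 rest.tail
      else c :: aGo 0 rest
    else if state = 1 ∨ state = 2 ∨ state = 3 then
      let quote := if state = 1 then '\'' else if state = 2 then '"' else '`'
      if c = '\\' then
        match rest with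
        | [] => [' ']                      -- i+1 ≥ n: append one blank, i += 1, loop ends
        | _ :: rest' => ' ' :: ' ' :: aGo state rest'
      else if c = quote then ' ' :: aGo 0 rest
      else (if c = '\n' then '\n' else ' ') :: aGo state rest
    else if state = 4 then
      if c = '\n' then '\n' :: aGo 0 rest
      else ' ' :: aGo 4 rest
    else -- state = 5
      if c = '*' ∧ rest.head? = some '/' then ' ' :: ' ' :: aGo 0 rest.tail
      else (if c = '\n' then '\n' else ' ') :: aGo 5 rest
  termination_by l => l.length
  decreasing_by all_goals first
    | (cases rest <;> simp_all)
    | simp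

def strip_ts_strings_and_comments_py (code : String) : String :=
  String.ofList (aGo 0 code.toList)

-- ===== PORT B =====
def bBlank (c : Char) : Char := if c = '\n' then '\n' else ' '

-- blanked string body after the opening quote; returns (chunk, remainder past the closing quote)
def bString (q : Char) : List Char → List Char × List Char
  | [] => ([], [])
  | c :: rest =>
    if c = '\\' then
      match rest with
      | [] => ([' '], [])
      | _ :: rest' => (' ' :: ' ' :: (bString q rest').1, (bString q rest').2)
    else if c = q then ([' '], rest)
    else (bBlank c :: (bString q rest).1, (bString q rest).2)

-- blanks to the end of line; leaves the newline in the remainder for the caller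
def bLine : List Char → List Char × List Char
  | [] => ([], [])
  | c :: rest =>
    if c = '\n' then ([], c :: rest)
    else (' ' :: (bLine rest).1, (bLine rest).2)

def bBlock : List Char → List Char × List Char
  | [] => ([], [])
  | c :: rest =>
    if c = '*' ∧ rest.head? = some '/' then ([' ', ' '], rest.tail)
    else (bBlank c :: (bBlock rest).1, (bBlock rest).2)

theorem bString_len (q : Char) (l : List Char) : (bString q l).2.length ≤ l.length := by
  fun_induction bString q l <;> simp_all <;> omega

theorem bLine_len (l : List Char) : (bLine l).2.length ≤ l.length := by
  fun_induction bLine l <;> simp_all <;> omega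

theorem bBlock_len (l : List Char) : (bBlock l).2.length ≤ l.length := by
  fun_induction bBlock l <;> simp_all [List.tail] <;> (try cases ‹List Char›) <;> simp_all <;> omega

def bGo : List Char → List Char
  | [] => []
  | c :: rest =>
    if c = '\'' ∨ c = '"' ∨ c = '`' then
      ' ' :: ((bString c rest).1 ++ bGo (bString c rest).2)
    else if c = '/' ∧ rest.head? = some '/' then
      ' ' :: ' ' :: ((bLine rest.tail).1 ++ bGo (bLine rest.tail).2)
    else if c = '/' ∧ rest.head? = some '*' then
      ' ' :: ' ' :: ((bBlock rest.tail).1 ++ bGo (bBlock rest.tail).2)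
    else c :: bGo rest
  termination_by l => l.length
  decreasing_by
  · have := bString_len c rest; simp; omega
  · have := bLine_len rest.tail; cases rest <;> simp_all <;> omega
  · have := bBlock_len rest.tail; cases rest <;> simp_all <;> omega
  · simp

def strip_ts_strings_and_comments_py_alt (code : String) : String :=
  String.ofList (bGo code.toList)

-- ===== PRECONDITION & SPEC =====
def Spec_strip_ts_strings_and_comments_py (code : String) (out : String) : Prop := out = strip_ts_strings_and_comments_py_alt code
instance (code : String) (out : String) : Decidable (Spec_strip_ts_strings_and_comments_py code out) := by unfold Spec_strip_ts_strings_and_comments_py; infer_instance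

-- ===== CLAIM (what is proved, stated in full; the proofs are below) =====
def Claim_equal_strip_ts_strings_and_comments_py : Prop := ∀ (code : String), Dom_strip_ts_strings_and_comments_py code → Spec_strip_ts_strings_and_comments_py code (strip_ts_strings_and_comments_py code)

-- ===== LEMMAS AND PROOFS =====

theorem aGo_string (q : Char) (s : Nat) (hq : (s = 1 ∧ q = '\'') ∨ (s = 2 ∧ q = '"') ∨ (s = 3 ∧ q = '`'))
    (l : List Char) : aGo s l = (bString q l).1 ++ aGo 0 (bString q l).2 := by
  rcases hq with ⟨rfl, rfl⟩ | ⟨rfl, rfl⟩ | ⟨rfl, rfl⟩ <;>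
  · fun_induction bString with
    | case1 => simp [aGo.eq_def]
    | case2 => rw [aGo.eq_def]; simp [aGo.eq_def]
    | case3 h rest' ih => rw [aGo.eq_def]; simp [ih]
    | case4 rest => rw [aGo.eq_def]; simp
    | case5 c rest h1 h2 ih => rw [aGo.eq_def]; simp [h1, h2, bBlank, ih]

theorem aGo_line (l : List Char) : aGo 4 l = (bLine l).1 ++ aGo 0 (bLine l).2 := by
  fun_induction bLine with
  | case1 => simp [aGo.eq_def]
  | case2 rest => rw [aGo.eq_def]; rw [aGo.eq_def]; simp
  | case3 c rest h ih => rw [aGo.eq_def]; simp [h, ih]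

theorem aGo_block (l : List Char) : aGo 5 l = (bBlock l).1 ++ aGo 0 (bBlock l).2 := by
  fun_induction bBlock with
  | case1 => simp [aGo.eq_def]
  | case2 c rest h => rw [aGo.eq_def]; simp [h.1, h.2]
  | case3 c rest h ih =>
    rw [aGo.eq_def]
    simp [h, bBlank, ih]

theorem aGo_eq_bGo (l : List Char) : aGo 0 l = bGo l := by
  fun_induction bGo with
  | case1 => simp [aGo.eq_def]
  | case2 c rest h ih =>
    rcases h with rfl | rfl | rfl <;>
      (rw [aGo.eq_def]; simp;
       first
       | rw [aGo_string '\'' 1 (by simp), ih]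
       | rw [aGo_string '"' 2 (by simp), ih]
       | rw [aGo_string '`' 3 (by simp), ih])
  | case3 c rest h1 h2 ih =>
    obtain ⟨rfl, hh⟩ := h2
    rw [aGo.eq_def]; simp [hh]; rw [aGo_line, ih]
  | case4 c rest h1 h2 h3 ih =>
    obtain ⟨rfl, hh⟩ := h3
    rw [aGo.eq_def]; simp [hh]; rw [aGo_block, ih]
  | case5 c rest h1 h2 h3 ih =>
    rw [aGo.eq_def]
    have n1 : ¬c = '\'' := fun x => h1 (Or.inl x)
    have n2 : ¬c = '"' := fun x => h1 (Or.inr (Or.inl x))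
    have n3 : ¬c = '`' := fun x => h1 (Or.inr (Or.inr x))
    simp [n1, n2, n3, h2, h3, ih]

-- ===== VERDICT (by name: the statement is the Claim_ definition above) =====
theorem strip_ts_strings_and_comments_py_spec : Claim_equal_strip_ts_strings_and_comments_py := by
  intro code _
  unfold Spec_strip_ts_strings_and_comments_py strip_ts_strings_and_comments_py strip_ts_strings_and_comments_py_alt
  rw [aGo_eq_bGo]
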